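-- pv_equiv track=rewrite | github.com/djccnt15/maths | linalg.py | mat_bidiag_l
-- ===== SOURCE A (Python) =====
-- def mat_bidiag_l(a):
--     n = len(a)
--     m = len(a[0])
--     res = []
--
--     for i in range(n):
--         row = []
--         for j in range(m):
--             if i < j or i-j > 1:
--                 row.append(0)
--             else:
--                 row.append(a[i][j])
--         res.append(row)
--
--     return res
-- ===== SOURCE B (Python) =====
-- def mat_bidiag_l(a):
--     m = len(a[0])
--     res = []
--     for i, src in enumerate(a):
--         row = [0] * m
--         if i < m:
--             row[i] = src[i]
--         if 1 <= i <= m: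
--             row[i - 1] = src[i - 1]
--         res.append(row)
--     return res
-- ===== Notes on version B (the rewrite author's own statement) =====
-- stated objective: simpler
-- what changed: A tests the band condition on every cell in a nested loop over all n*m positions; B builds each row as a zero row of length m and performs at most two targeted writes (diagonal and subdiagonal) per row, with no inner loop or per-cell test.
import Mathlib
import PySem

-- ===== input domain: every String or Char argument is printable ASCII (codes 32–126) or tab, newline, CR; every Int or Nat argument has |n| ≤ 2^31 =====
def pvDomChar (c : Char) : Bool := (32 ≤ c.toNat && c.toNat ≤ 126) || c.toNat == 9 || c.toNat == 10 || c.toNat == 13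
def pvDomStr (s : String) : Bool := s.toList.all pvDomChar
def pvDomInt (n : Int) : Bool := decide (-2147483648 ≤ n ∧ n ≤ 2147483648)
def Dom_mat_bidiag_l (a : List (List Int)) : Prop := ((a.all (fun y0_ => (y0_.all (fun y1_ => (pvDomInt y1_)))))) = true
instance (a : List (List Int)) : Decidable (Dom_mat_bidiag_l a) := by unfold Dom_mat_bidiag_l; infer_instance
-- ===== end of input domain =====

-- B rewrites A's per-cell nested loop as "zero row + two targeted band writes" per row: simpler, not faster.

-- ===== PORT A =====
-- a[i] for i ∈ range(n) is always in bounds, and a[i][j] is in bounds under Pre_,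
-- so getD is exact there (Pre_ excludes the inputs where Python raises IndexError).
def mat_bidiag_l (a : List (List Int)) : List (List Int) :=
  let n := a.length
  let m := (a.getD 0 []).length
  (List.range n).map (fun i =>
    (List.range m).map (fun j =>
      if i < j ∨ i - j > 1 then 0 else (a.getD i []).getD j 0))

-- ===== PORT B =====
-- enumerate indices are ≥ 0, so .toNat on them is exact; getD/set are exact under Pre_.
def mat_bidiag_l_alt (a : List (List Int)) : List (List Int) :=
  let m := (a.getD 0 []).length
  (PySem.List.enumerate a).map (fun p =>
    let i := p.1
    let src := p.2
    let row := List.replicate m 0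
    let row := if i < (m : Int) then row.set i.toNat (src.getD i.toNat 0) else row
    if 1 ≤ i ∧ i ≤ (m : Int) then row.set (i - 1).toNat (src.getD (i - 1).toNat 0) else row)

-- ===== PRECONDITION & SPEC =====
-- Pre_ = exactly the inputs on which the Python A returns: a nonempty, and for every row i
-- the band cells a[i][i] (if i < m) and a[i][i-1] (if 1 ≤ i ≤ m) exist; elsewhere A raises IndexError.
def Pre_mat_bidiag_l (a : List (List Int)) : Prop :=
  a ≠ [] ∧ ∀ i ∈ List.range a.length,
    (i < (a.getD 0 []).length → i < (a.getD i []).length) ∧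
    (1 ≤ i → i - 1 < (a.getD 0 []).length → i - 1 < (a.getD i []).length)
instance (a : List (List Int)) : Decidable (Pre_mat_bidiag_l a) := by
  unfold Pre_mat_bidiag_l; infer_instance

def pvWitness_mat_bidiag_l : List (List Int) := [[1, 2, 3], [4, 5, 6], [7, 8, 9]]

def Spec_mat_bidiag_l (a : List (List Int)) (out : List (List Int)) : Prop := out = mat_bidiag_l_alt a
instance (a : List (List Int)) (out : List (List Int)) : Decidable (Spec_mat_bidiag_l a out) := by unfold Spec_mat_bidiag_l; infer_instance

-- ===== CLAIM (what is proved, stated in full; the proofs are below) =====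
def Claim_equal_mat_bidiag_l : Prop := ∀ (a : List (List Int)), Dom_mat_bidiag_l a → Pre_mat_bidiag_l a → Spec_mat_bidiag_l a (mat_bidiag_l a)

-- ===== LEMMAS AND PROOFS =====

theorem mat_bidiag_l_rows_eq (a : List (List Int)) :
    mat_bidiag_l a = mat_bidiag_l_alt a := by
  unfold mat_bidiag_l mat_bidiag_l_alt
  apply List.ext_getElem
  · simp [PySem.List.length_enumerate]
  · intro i h1 h2
    have hi : i < a.length := by simpa using h1
    simp only [List.getElem_map, List.getElem_range, PySem.List.getElem_enumerate, zero_add]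
    have t2 : (((i : Int)) - 1).toNat = i - 1 := by omega
    rw [List.getD_eq_getElem a [] hi]
    simp only [Int.toNat_natCast, t2]
    apply List.ext_getElem
    · simp only [List.length_map, List.length_range]
      split_ifs <;> simp
    · intro j hj1 hj2
      have hjm : j < (a.getD 0 []).length := by simpa using hj1
      simp only [List.getElem_map, List.getElem_range]
      split_ifs <;>
        simp only [List.getElem_set, List.getElem_replicate] <;>
        (try split_ifs) <;>
        (try subst_vars) <;>
        first | rfl | omega

-- ===== VERDICT (by name: the statement is the Claim_ definition above) =====
theorem mat_bidiag_l_spec : Claim_equal_mat_bidiag_l := by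
  intro a _ _
  unfold Spec_mat_bidiag_l
  exact mat_bidiag_l_rows_eq a
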